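-- pv_equiv track=rewrite | github.com/MrDonkey08/Digital-Garden | _notes/Cursos/Computación/Programación/Lenguajes de programación/Python/Tlaloc/Actividades/Actividad 2.py | producto2
-- ===== SOURCE A (Python) =====
-- def producto2(producto, cant):
--     producto_2 = []
--     for i in range(cant*3):
--         producto_2.append(producto[i]);
--     num = 0;
--     for i in range(cant):
--         producto_2[num] = str.lower(producto_2[num]);
--         num += 3;
--     return producto_2;
-- ===== SOURCE B (Python) =====
-- def producto2(producto, cant):
--     # Single pass: build the slice and lowercase every third element inline,
--     # instead of copying first and patching in a second loop.
--     producto_2 = []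
--     for i in range(cant * 3):
--         x = producto[i]
--         if i % 3 == 0:
--             producto_2.append(str.lower(x))
--         else:
--             producto_2.append(x)
--     return producto_2
-- ===== Notes on version B (the rewrite author's own statement) =====
-- stated objective: simpler
-- what changed: Fuses A's two passes (copy the first cant*3 elements, then lowercase indices 0,3,... in a second loop) into one loop that lowercases an element inline when its index is divisible by 3.
import Mathlib
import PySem

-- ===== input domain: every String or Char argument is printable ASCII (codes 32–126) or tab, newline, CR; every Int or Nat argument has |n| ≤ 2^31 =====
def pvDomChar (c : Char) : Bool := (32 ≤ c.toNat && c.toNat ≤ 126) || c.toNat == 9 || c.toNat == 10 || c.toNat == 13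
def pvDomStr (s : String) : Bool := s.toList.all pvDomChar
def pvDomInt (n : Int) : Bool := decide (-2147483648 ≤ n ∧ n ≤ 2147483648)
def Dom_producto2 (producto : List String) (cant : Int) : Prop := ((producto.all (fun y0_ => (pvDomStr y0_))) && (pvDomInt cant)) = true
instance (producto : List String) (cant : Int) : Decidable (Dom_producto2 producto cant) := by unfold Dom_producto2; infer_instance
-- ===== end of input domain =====

-- B fuses A's two passes (copy cant*3 elements, then lowercase every third in place)
-- into one loop that lowercases inline when the index is divisible by 3 (objective: simpler).

-- ===== PORT A =====
def producto2 (producto : List String) (cant : Int) : List String :=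
  -- first loop: producto_2.append(producto[i])  (in range on Pre_, so getD "" is exact)
  let producto_2 := (PySem.List.pyRange 0 (cant * 3) 1).foldl
    (fun acc i => acc ++ [PySem.List.pyGetD producto i ""]) []
  -- second loop over (list, num): producto_2[num] = str.lower(producto_2[num]); num += 3
  ((PySem.List.pyRange 0 cant 1).foldl
    (fun (st : List String × Int) _ =>
      (PySem.List.pySetD st.1 st.2 (PySem.Str.lower (PySem.List.pyGetD st.1 st.2 "")), st.2 + 3))
    (producto_2, 0)).1

-- ===== PORT B =====
def producto2_alt (producto : List String) (cant : Int) : List String :=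
  (PySem.List.pyRange 0 (cant * 3) 1).foldl
    (fun acc i =>
      let x := PySem.List.pyGetD producto i ""
      if PySem.Int.mod i 3 == 0 then acc ++ [PySem.Str.lower x] else acc ++ [x]) []

-- ===== PRECONDITION & SPEC =====
-- Pre_ excludes exactly the inputs where A raises IndexError (producto shorter than cant*3).
def Pre_producto2 (producto : List String) (cant : Int) : Prop :=
  cant * 3 ≤ (producto.length : Int)
instance (producto : List String) (cant : Int) : Decidable (Pre_producto2 producto cant) := by
  unfold Pre_producto2; infer_instance
def pvWitness_producto2 : List String × Int := (["Ab", "CD", "eF", "GH"], 1)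

def Spec_producto2 (producto : List String) (cant : Int) (out : List String) : Prop := out = producto2_alt producto cant
instance (producto : List String) (cant : Int) (out : List String) : Decidable (Spec_producto2 producto cant out) := by unfold Spec_producto2; infer_instance

-- ===== CLAIM (what is proved, stated in full; the proofs are below) =====
def Claim_equal_producto2 : Prop := ∀ (producto : List String) (cant : Int), Dom_producto2 producto cant → Pre_producto2 producto cant → Spec_producto2 producto cant (producto2 producto cant)

-- ===== LEMMAS AND PROOFS =====

-- The second loop of A, iterated n times from state (l, 3*k): structural recursion on n.
def pvPatch (n : Nat) (l : List String) : List String :=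
  match n with
  | 0 => l
  | n + 1 =>
    PySem.List.pySetD (pvPatch n l) ((3 * n : Nat) : Int)
      (PySem.Str.lower (PySem.List.pyGetD (pvPatch n l) ((3 * n : Nat) : Int) ""))

theorem pvPatch_length (n : Nat) (l : List String) : (pvPatch n l).length = l.length := by
  induction n with
  | zero => rfl
  | succ n ih => simp [pvPatch, ih]

theorem pvPatch_get (n : Nat) (l : List String) : ∀ (j : Nat) (hj : j < l.length),
    (pvPatch n l)[j]'(by rw [pvPatch_length]; exact hj) =
      if j % 3 = 0 ∧ j < 3 * n then PySem.Str.lower (l[j]) else l[j] := by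
  induction n with
  | zero => intro j hj; simp [pvPatch]
  | succ n ih =>
    intro j hj
    have hlen : (pvPatch n l).length = l.length := pvPatch_length n l
    by_cases hin : 3 * n < l.length
    · have hget : PySem.List.pyGetD (pvPatch n l) ((3 * n : Nat) : Int) "" = l[3 * n] := by
        rw [PySem.List.pyGetD_natCast, List.getD_eq_getElem?_getD,
          List.getElem?_eq_getElem (by omega : 3 * n < (pvPatch n l).length)]
        simpa using ih (3 * n) hin
      simp only [pvPatch, PySem.List.pySetD_natCast, hget]
      rw [List.getElem_set]
      by_cases hj3 : 3 * n = j
      · subst hj3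
        rw [if_pos rfl, if_pos ⟨by omega, by omega⟩]
      · rw [if_neg hj3, ih j hj]
        have : (j % 3 = 0 ∧ j < 3 * n) ↔ (j % 3 = 0 ∧ j < 3 * (n + 1)) := by omega
        simp [this]
    · -- out-of-range set is identity; all j < length are already < 3*n
      have hset : (pvPatch n l).set (3 * n) (PySem.Str.lower
          (PySem.List.pyGetD (pvPatch n l) ((3 * n : Nat) : Int) "")) = pvPatch n l := by
        apply List.set_eq_of_length_le; omega
      simp only [pvPatch, PySem.List.pySetD_natCast, hset]
      rw [ih j hj]
      have : (j % 3 = 0 ∧ j < 3 * n) ↔ (j % 3 = 0 ∧ j < 3 * (n + 1)) := by omega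
      simp [this]

-- A's second loop equals pvPatch (body ignores the loop variable; induct on the range from the right).
theorem pvLoop2_eq (n : Nat) (l : List String) :
    ((PySem.List.pyRange 0 (n : Int) 1).foldl
      (fun (st : List String × Int) _ =>
        (PySem.List.pySetD st.1 st.2 (PySem.Str.lower (PySem.List.pyGetD st.1 st.2 "")), st.2 + 3))
      (l, 0)) = (pvPatch n l, ((3 * n : Nat) : Int)) := by
  induction n with
  | zero => simp [PySem.List.pyRange_one_eq_nil, pvPatch]
  | succ n ih =>
    rw [show ((n + 1 : Nat) : Int) = (n : Int) + 1 by push_cast; ring,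
      PySem.List.pyRange_one_succ_right (by positivity), List.foldl_append, ih]
    simp only [List.foldl_cons, List.foldl_nil, pvPatch, Prod.mk.injEq]
    refine ⟨trivial, ?_⟩
    push_cast
    ring

theorem producto2_spec_core (producto : List String) (cant : Int) :
    producto2 producto cant = producto2_alt producto cant := by
  by_cases hneg : cant ≤ 0
  · have h3 : cant * 3 ≤ 0 := by nlinarith
    simp [producto2, producto2_alt, PySem.List.pyRange_one_eq_nil h3,
      PySem.List.pyRange_one_eq_nil hneg]
  · have hpos : 0 < cant := by omega
    set g : Int → String := fun i => PySem.List.pyGetD producto i "" with hg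
    have hc3 : cant * 3 = ((3 * cant.toNat : Nat) : Int) := by push_cast; omega
    have hA : producto2 producto cant =
        pvPatch cant.toNat ((PySem.List.pyRange 0 (cant * 3) 1).map g) := by
      have h := pvLoop2_eq cant.toNat ((PySem.List.pyRange 0 (cant * 3) 1).map g)
      rw [Int.toNat_of_nonneg (by omega : (0 : Int) ≤ cant)] at h
      simp only [producto2, PySem.List.foldl_append_singleton_eq_map, List.nil_append]
      rw [← hg, h]
    have hB : producto2_alt producto cant = (PySem.List.pyRange 0 (cant * 3) 1).map
        (fun i => if PySem.Int.mod i 3 == 0 then PySem.Str.lower (g i) else g i) := by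
      unfold producto2_alt
      have hcongr : (PySem.List.pyRange 0 (cant * 3) 1).foldl
          (fun acc i =>
            let x := PySem.List.pyGetD producto i ""
            if PySem.Int.mod i 3 == 0 then acc ++ [PySem.Str.lower x] else acc ++ [x]) [] =
          (PySem.List.pyRange 0 (cant * 3) 1).foldl
          (fun acc i => acc ++ [if PySem.Int.mod i 3 == 0 then PySem.Str.lower (g i) else g i]) [] := by
        apply PySem.List.foldl_congr_mem
        intro acc x _
        simp only [hg]
        split <;> rfl
      simp only [hcongr, PySem.List.foldl_append_singleton_eq_map, List.nil_append]
    rw [hA, hB]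
    apply List.ext_getElem
    · simp [pvPatch_length]
    · intro j h1 h2
      have hjlen : j < (PySem.List.pyRange 0 (cant * 3) 1).length := by
        simpa [pvPatch_length] using h1
      have hjr : j < (cant * 3).toNat := by
        simpa [PySem.List.length_pyRange_one] using hjlen
      rw [pvPatch_get _ _ j (by simpa using hjlen)]
      simp only [List.getElem_map, PySem.List.getElem_pyRange_one, zero_add]
      have hmod : (PySem.Int.mod ((j : Nat) : Int) 3 == 0) = decide (j % 3 = 0) := by
        simp only [beq_eq_decide, decide_eq_decide, PySem.Int.mod_eq_zero_iff_dvd]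
        omega
      have hlt : j < 3 * cant.toNat := by omega
      rw [hmod]
      by_cases h3 : j % 3 = 0 <;> simp [h3, hlt]

-- ===== VERDICT (by name: the statement is the Claim_ definition above) =====
theorem producto2_spec : Claim_equal_producto2 := by
  intro producto cant _ _
  exact producto2_spec_core producto cant
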